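-- pv_equiv track=rewrite | github.com/Alset-Nikolas/Algorithm_training_1 | июнь 2021, занятие 2/E. Чемпионат по метанию коровьих лепешек.py | place_vasia
-- ===== SOURCE A (Python) =====
-- def place_vasia(mass):
--     res = 0
--     if len(mass) < 3 or any(x < 0 for x in mass):
--         return 0
--     mass_sort = sorted(mass, reverse=True)
--     winner_index = mass.index(mass_sort[0])
--     vasia_el = None
--     for number_shot in range(winner_index + 1, len(mass) - 1):
--         el = mass[number_shot]
--         if el % 10 == 5:
--             if mass[number_shot + 1] < mass[number_shot]:
--                     if vasia_el is None or vasia_el < el: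
--                         vasia_el = el
--                         res = mass_sort.index(el) + 1
--
--     return res
-- ===== SOURCE B (Python) =====
-- def place_vasia(mass):
--     # Staged pipeline, no sorted copy and no index loop: collect all qualifying
--     # scores from adjacent pairs past the winner, take their maximum, and rank
--     # it as 1 + number of strictly greater scores.
--     if len(mass) < 3 or any(x < 0 for x in mass):
--         return 0
--     w = mass.index(max(mass))
--     cands = [a for i, (a, b) in enumerate(zip(mass, mass[1:]))
--              if w < i and a % 10 == 5 and b < a]
--     if not cands:
--         return 0
--     best = max(cands)
--     return sum(1 for x in mass if x > best) + 1
-- ===== Notes on version B (the rewrite author's own statement) =====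
-- stated objective: simpler
-- what changed: B replaces A's stateful loop with ranks looked up in a descending sorted copy by a staged pipeline: list-comprehend the qualifying scores out of enumerate(zip(mass, mass[1:])), take max() of them, and recompute the rank once as 1 + the count of strictly greater scores; no sorted list and no .index inside a loop.
import Mathlib
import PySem

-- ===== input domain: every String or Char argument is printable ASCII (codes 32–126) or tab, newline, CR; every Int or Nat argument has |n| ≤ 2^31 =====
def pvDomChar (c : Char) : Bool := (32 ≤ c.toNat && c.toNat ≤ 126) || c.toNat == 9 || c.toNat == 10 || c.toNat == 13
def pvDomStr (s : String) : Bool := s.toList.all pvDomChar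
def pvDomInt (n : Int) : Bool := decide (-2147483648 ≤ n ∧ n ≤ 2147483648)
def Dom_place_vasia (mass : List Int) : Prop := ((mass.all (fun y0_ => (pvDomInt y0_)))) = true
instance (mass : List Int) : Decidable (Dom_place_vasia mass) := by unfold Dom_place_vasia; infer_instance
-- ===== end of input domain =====

-- B drops A's sorted copy and its stateful rank-tracking loop for a staged pipeline:
-- filter the qualifying scores out of enumerate(zip(mass, mass[1:])), take their max,
-- and rank it as 1 + the count of strictly greater scores; return values proved equal.

-- ===== PORT A =====
def place_vasia (mass : List Int) : Int :=
  if mass.length < 3 ∨ mass.any (fun x => x < 0) then 0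
  else
    let mass_sort := PySem.List.sorted mass (fun x => x) true
    let winner_index : Int := ((PySem.List.index? mass (PySem.List.pyGetD mass_sort 0 0)).getD 0 : Nat)
    let st := (PySem.List.pyRange (winner_index + 1) ((mass.length : Int) - 1) 1).foldl
      (fun (st : Option Int × Int) number_shot =>
        let el := PySem.List.pyGetD mass number_shot 0
        if PySem.Int.mod el 10 = 5 then
          if PySem.List.pyGetD mass (number_shot + 1) 0 < PySem.List.pyGetD mass number_shot 0 then
            if (match st.1 with | none => true | some v => decide (v < el)) then
              (some el, ((PySem.List.index? mass_sort el).getD 0 : Nat) + 1)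
            else st
          else st
        else st)
      ((none : Option Int), (0 : Int))
    st.2

-- ===== PORT B =====
def place_vasia_alt (mass : List Int) : Int :=
  if mass.length < 3 ∨ mass.any (fun x => x < 0) then 0
  else
    let w : Int := ((PySem.List.index? mass ((PySem.List.max? mass (fun x => x)).getD 0)).getD 0 : Nat)
    let cands := (PySem.List.enumerate (mass.zip (PySem.List.slice mass (some 1) none))).filterMap
      (fun p => if w < p.1 ∧ PySem.Int.mod p.2.1 10 = 5 ∧ p.2.2 < p.2.1 then some p.2.1 else none)
    match PySem.List.max? cands (fun x => x) with
    | none => 0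
    | some best => ((mass.countP (fun x => best < x) : Nat) : Int) + 1

-- ===== PRECONDITION & SPEC =====
def Spec_place_vasia (mass : List Int) (out : Int) : Prop := out = place_vasia_alt mass
instance (mass : List Int) (out : Int) : Decidable (Spec_place_vasia mass out) := by unfold Spec_place_vasia; infer_instance

-- ===== CLAIM (what is proved, stated in full; the proofs are below) =====
def Claim_equal_place_vasia : Prop := ∀ (mass : List Int), Dom_place_vasia mass → Spec_place_vasia mass (place_vasia mass)

-- ===== LEMMAS AND PROOFS =====

-- rank of an element of a descending-sorted list = number of strictly greater elements
theorem idxOf_desc_eq_countP (s : List Int) (v : Int)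
    (hs : s.Pairwise (fun a b => b ≤ a)) (hv : v ∈ s) :
    PySem.List.index? s v = some (s.countP (fun x => decide (v < x))) := by
  induction s with
  | nil => cases hv
  | cons a t ih =>
    rcases List.pairwise_cons.mp hs with ⟨ha, ht⟩
    by_cases hva : v = a
    · subst hva
      have h0 : t.countP (fun x => decide (v < x)) = 0 := by
        apply List.countP_eq_zero.mpr
        intro x hx
        simpa using not_lt.mpr (ha x hx)
      simp [PySem.List.index?_eq_idxOf?, List.idxOf?_cons, h0]
    · have hvt : v ∈ t := by
        rcases List.mem_cons.mp hv with h | h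
        · exact absurd h hva
        · exact h
      have hlt : v < a := lt_of_le_of_ne (ha v hvt) hva
      have := ih ht hvt
      rw [PySem.List.index?_eq_idxOf?] at this ⊢
      simp [List.idxOf?_cons, Ne.symm hva, this, hlt, Nat.add_comm]

theorem head_sorted_rev_eq_max (mass : List Int) (h : mass ≠ []) :
    PySem.List.pyGetD (PySem.List.sorted mass (fun x => x) true) 0 0
      = (PySem.List.max? mass (fun x => x)).getD 0 := by
  have hperm := PySem.List.sorted_perm mass (fun x => x) true
  cases hsort : PySem.List.sorted mass (fun x => x) true with
  | nil =>
    exact absurd ((PySem.List.sorted_eq_nil_iff mass (fun x => x) true).mp hsort) h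
  | cons m t =>
    have hmax : ∀ y ∈ mass, y ≤ m := PySem.List.key_head_sorted_rev_ge mass (fun x => x) hsort
    have hm_mem : m ∈ mass := by
      have : m ∈ PySem.List.sorted mass (fun x => x) true := by rw [hsort]; exact List.mem_cons_self
      exact (PySem.List.mem_sorted mass (fun x => x) true m).mp this
    cases hmx : PySem.List.max? mass (fun x => x) with
    | none => exact absurd ((PySem.List.max?_eq_none_iff mass (fun x => x)).mp hmx) h
    | some mx =>
      have hmx_mem : mx ∈ mass := PySem.List.max?_mem hmx
      have h1 : ∀ y ∈ mass, y ≤ mx := PySem.List.max?_isMax hmx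
      have : m = mx := le_antisymm (h1 m hm_mem) (hmax mx hmx_mem)
      simp [PySem.List.pyGetD_zero_cons, this]

-- proof-side views of the two computations
def stepA (mass : List Int) (mass_sort : List Int) (st : Option Int × Int) (i : Int) : Option Int × Int :=
  let el := PySem.List.pyGetD mass i 0
  if PySem.Int.mod el 10 = 5 then
    if PySem.List.pyGetD mass (i + 1) 0 < PySem.List.pyGetD mass i 0 then
      if (match st.1 with | none => true | some v => decide (v < el)) then
        (some el, ((PySem.List.index? mass_sort el).getD 0 : Nat) + 1)
      else st
    else st
  else st

def stepB (mass : List Int) (v : Option Int) (i : Int) : Option Int :=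
  let el := PySem.List.pyGetD mass i 0
  if PySem.Int.mod el 10 = 5 ∧ PySem.List.pyGetD mass (i + 1) 0 < el then
    if (match v with | none => true | some w => decide (w < el)) then some el else v
  else v

def rOf (mass_sort : List Int) (v : Option Int) : Int :=
  match v with
  | none => 0
  | some x => ((PySem.List.index? mass_sort x).getD 0 : Nat) + 1

-- the qualifying score at index i (if any), and the running-max update
def qual (mass : List Int) (i : Int) : Option Int :=
  let el := PySem.List.pyGetD mass i 0
  if PySem.Int.mod el 10 = 5 ∧ PySem.List.pyGetD mass (i + 1) 0 < el then some el else none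

def mUpd (v : Option Int) (el : Int) : Option Int :=
  if (match v with | none => true | some w => decide (w < el)) then some el else v

theorem fold_invariant (mass mass_sort : List Int) (L : List Int) (v : Option Int)
    (hmem : v = none ∨ ∃ x, v = some x ∧ x ∈ mass)
    (hL : ∀ i ∈ L, 0 ≤ i ∧ i < (mass.length : Int)) :
    L.foldl (stepA mass mass_sort) (v, rOf mass_sort v)
      = (L.foldl (stepB mass) v, rOf mass_sort (L.foldl (stepB mass) v))
    ∧ (L.foldl (stepB mass) v = none ∨ ∃ x, L.foldl (stepB mass) v = some x ∧ x ∈ mass) := by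
  induction L generalizing v with
  | nil => exact ⟨rfl, hmem⟩
  | cons i L ih =>
    have hi := hL i List.mem_cons_self
    have hL' : ∀ j ∈ L, 0 ≤ j ∧ j < (mass.length : Int) := fun j hj => hL j (List.mem_cons_of_mem i hj)
    have hel_mem : PySem.List.pyGetD mass i 0 ∈ mass := by
      apply PySem.List.pyGetD_mem
      simp [PySem.Raise.InRange]
      omega
    have hstep : stepA mass mass_sort (v, rOf mass_sort v) i
        = (stepB mass v i, rOf mass_sort (stepB mass v i)) := by
      cases v with
      | none =>
        simp only [stepA, stepB]
        split_ifs <;> simp_all [rOf]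
      | some w =>
        simp only [stepA, stepB]
        split_ifs <;> simp_all [rOf]
    have hmem' : stepB mass v i = none ∨ ∃ x, stepB mass v i = some x ∧ x ∈ mass := by
      cases v with
      | none =>
        simp only [stepB]
        split_ifs <;> first
          | exact Or.inr ⟨_, rfl, hel_mem⟩
          | exact hmem
          | simp_all
      | some w =>
        simp only [stepB]
        split_ifs <;> first
          | exact Or.inr ⟨_, rfl, hel_mem⟩
          | exact hmem
          | simp_all
    simp only [List.foldl_cons, hstep]
    exact ih (stepB mass v i) hmem' hL'

-- A's inner fold is the running-max fold over the list of qualifying scores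
theorem foldl_stepB_eq_mUpd (mass : List Int) (L : List Int) (v : Option Int) :
    L.foldl (stepB mass) v = (L.filterMap (qual mass)).foldl mUpd v := by
  induction L generalizing v with
  | nil => rfl
  | cons i L ih =>
    have hstep : stepB mass v i = ((qual mass i).elim v (mUpd v)) := by
      simp only [stepB, qual]
      split_ifs <;> simp_all [mUpd]
    cases hq : qual mass i <;>
      simp [List.foldl_cons, hq, hstep, ih]

theorem foldl_mUpd_spec (ys : List Int) (v : Option Int) :
    (ys.foldl mUpd v = none → ys = [] ∧ v = none)
    ∧ (∀ m, ys.foldl mUpd v = some m →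
        (m ∈ ys ∨ v = some m) ∧ (∀ y ∈ ys, y ≤ m) ∧ (∀ w, v = some w → w ≤ m)) := by
  induction ys generalizing v with
  | nil => exact ⟨fun h => ⟨rfl, h⟩, fun m h => ⟨Or.inr h, by simp, fun w hw => by simp_all⟩⟩
  | cons a t ih =>
    constructor
    · intro h
      rcases (ih (mUpd v a)).1 (by simpa using h) with ⟨_, h2⟩
      exfalso
      simp only [mUpd] at h2
      split_ifs at h2 <;> simp_all
    · intro m h
      rcases (ih (mUpd v a)).2 m (by simpa using h) with ⟨hm, hle, hv⟩
      have ha_le : a ≤ m := by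
        simp only [mUpd] at hm hv
        split_ifs at hm hv with hc
        · exact hv a rfl
        · cases v with
          | none => simp_all
          | some w =>
            have hwm : w ≤ m := hv w rfl
            simp at hc
            omega
      refine ⟨?_, ?_, ?_⟩
      · rcases hm with hm | hm
        · exact Or.inl (List.mem_cons_of_mem a hm)
        · simp only [mUpd] at hm
          split_ifs at hm with hc
          · exact Or.inl (by simp_all)
          · exact Or.inr hm
      · intro y hy
        rcases List.mem_cons.mp hy with rfl | hy
        · exact ha_le
        · exact hle y hy
      · intro w hw
        subst hw
        simp only [mUpd] at hv
        split_ifs at hv with hc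
        · simp at hc; omega
        · exact hv w rfl

-- B's candidate list equals the filterMap of qual over A's index range
theorem cands_eq (mass : List Int) (hlen : 3 ≤ mass.length) (w : Nat) :
    (PySem.List.enumerate (mass.zip (PySem.List.slice mass (some 1) none))).filterMap
      (fun p => if ((w : Nat) : Int) < p.1 ∧ PySem.Int.mod p.2.1 10 = 5 ∧ p.2.2 < p.2.1 then some p.2.1 else none)
      = (PySem.List.pyRange (((w : Nat) : Int) + 1) ((mass.length : Int) - 1) 1).filterMap (qual mass) := by
  rw [PySem.List.slice_from_one]
  have hzlen : (mass.zip mass.tail).length = mass.length - 1 := by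
    rw [List.length_zip, List.length_tail]; omega
  have hN : PySem.List.len (mass.zip mass.tail) = (mass.length : Int) - 1 := by
    rw [PySem.List.len_eq, hzlen]; omega
  rw [PySem.List.enumerate_eq_map_pyRange (mass.zip mass.tail) (0, 0), hN,
    List.filterMap_map]
  -- elements of the 0..N range with index ≤ w contribute nothing; the rest is qual
  have hq : ∀ j : Int, 0 ≤ j → j < (mass.length : Int) - 1 →
      (if ((w : Nat) : Int) < j ∧ PySem.Int.mod (PySem.List.pyGetD (mass.zip mass.tail) j (0, 0)).1 10 = 5 ∧
            (PySem.List.pyGetD (mass.zip mass.tail) j (0, 0)).2 < (PySem.List.pyGetD (mass.zip mass.tail) j (0, 0)).1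
        then some (PySem.List.pyGetD (mass.zip mass.tail) j (0, 0)).1 else none)
      = (if ((w : Nat) : Int) < j then qual mass j else none) := by
    intro j hj0 hjN
    have hjz : j.toNat < (mass.zip mass.tail).length := by rw [hzlen]; omega
    have hget : PySem.List.pyGetD (mass.zip mass.tail) j (0, 0)
        = (mass[j.toNat]'(by omega), mass[j.toNat + 1]'(by omega)) := by
      rw [PySem.List.pyGetD_eq_getElem _ _ hj0 (by rw [hzlen]; omega)]
      rw [List.getElem_zip]
      congr 1
      exact List.getElem_tail _
    have hel : PySem.List.pyGetD mass j 0 = mass[j.toNat]'(by omega) :=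
      PySem.List.pyGetD_eq_getElem _ _ hj0 (by omega)
    have hel1 : PySem.List.pyGetD mass (j + 1) 0 = mass[j.toNat + 1]'(by omega) := by
      rw [PySem.List.pyGetD_eq_getElem _ _ (by omega : (0:Int) ≤ j + 1) (by omega)]
      congr 1
      omega
    simp only [qual, hget, hel, hel1]
    by_cases hw : ((w : Nat) : Int) < j <;> simp [hw]
  by_cases hsplit : ((w : Nat) : Int) + 1 ≤ (mass.length : Int) - 1
  · rw [PySem.List.pyRange_one_append 0 (((w : Nat) : Int) + 1) ((mass.length : Int) - 1)
      (by omega) hsplit, List.filterMap_append]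
    have h1 : (PySem.List.pyRange 0 (((w : Nat) : Int) + 1)).filterMap
        (fun j => (if ((w : Nat) : Int) < j ∧ PySem.Int.mod (PySem.List.pyGetD (mass.zip mass.tail) j (0, 0)).1 10 = 5 ∧
            (PySem.List.pyGetD (mass.zip mass.tail) j (0, 0)).2 < (PySem.List.pyGetD (mass.zip mass.tail) j (0, 0)).1
          then some (PySem.List.pyGetD (mass.zip mass.tail) j (0, 0)).1 else none)) = [] := by
      apply List.filterMap_eq_nil_iff.mpr
      intro j hj
      rcases PySem.List.mem_pyRange_one.mp hj with ⟨hj0, hjw⟩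
      have : ¬ ((w : Nat) : Int) < j := by omega
      simp [this]
    have h2 : (PySem.List.pyRange (((w : Nat) : Int) + 1) ((mass.length : Int) - 1)).filterMap
        (fun j => (if ((w : Nat) : Int) < j ∧ PySem.Int.mod (PySem.List.pyGetD (mass.zip mass.tail) j (0, 0)).1 10 = 5 ∧
            (PySem.List.pyGetD (mass.zip mass.tail) j (0, 0)).2 < (PySem.List.pyGetD (mass.zip mass.tail) j (0, 0)).1
          then some (PySem.List.pyGetD (mass.zip mass.tail) j (0, 0)).1 else none))
        = (PySem.List.pyRange (((w : Nat) : Int) + 1) ((mass.length : Int) - 1)).filterMap (qual mass) := by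
      apply List.filterMap_congr
      intro j hj
      rcases PySem.List.mem_pyRange_one.mp hj with ⟨hjw, hjN⟩
      rw [hq j (by omega) hjN]
      simp [show ((w : Nat) : Int) < j by omega]
    simp only [Function.comp_def] at h1 h2 ⊢
    rw [h1, h2, List.nil_append]
  · have hr : PySem.List.pyRange (((w : Nat) : Int) + 1) ((mass.length : Int) - 1) = [] :=
      PySem.List.pyRange_one_eq_nil (by omega)
    rw [hr]
    simp only [Function.comp_def, List.filterMap_nil]
    apply List.filterMap_eq_nil_iff.mpr
    intro j hj
    rcases PySem.List.mem_pyRange_one.mp hj with ⟨hj0, hjN⟩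
    have : ¬ ((w : Nat) : Int) < j := by omega
    simp [this]

-- ===== VERDICT (by name: the statement is the Claim_ definition above) =====
theorem place_vasia_spec : Claim_equal_place_vasia := by
  unfold Claim_equal_place_vasia
  intro mass _
  unfold Spec_place_vasia place_vasia place_vasia_alt
  by_cases hguard : mass.length < 3 ∨ mass.any (fun x => x < 0)
  · rw [if_pos hguard, if_pos hguard]
  · simp only [if_neg hguard]
    have hlen : 3 ≤ mass.length := by
      by_contra h; exact hguard (Or.inl (by omega))
    have hne : mass ≠ [] := by
      intro h; subst h; simp at hlen
    rw [head_sorted_rev_eq_max mass hne]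
    set w : Nat := (PySem.List.index? mass ((PySem.List.max? mass (fun x => x)).getD 0)).getD 0 with hw
    set ms := PySem.List.sorted mass (fun x => x) true with hms
    set L := PySem.List.pyRange (((w : Nat) : Int) + 1) ((mass.length : Int) - 1) 1 with hLdef
    have hL : ∀ i ∈ L, 0 ≤ i ∧ i < (mass.length : Int) := by
      intro i hi
      rcases PySem.List.mem_pyRange_one.mp hi with ⟨h1, h2⟩
      have : (0 : Int) ≤ ((w : Nat) : Int) := Int.natCast_nonneg _
      omega
    have hinv := fold_invariant mass ms L none (Or.inl rfl) hL
    have hAB : (L.foldl (stepA mass ms) ((none : Option Int), (0 : Int))).2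
        = rOf ms (L.foldl (stepB mass) none) := by
      rw [show ((none : Option Int), (0 : Int)) = ((none : Option Int), rOf ms none) from rfl, hinv.1]
    show (L.foldl (stepA mass ms) ((none : Option Int), (0 : Int))).2 = _
    rw [hAB, foldl_stepB_eq_mUpd, ← cands_eq mass hlen w]
    set cands := (PySem.List.enumerate (mass.zip (PySem.List.slice mass (some 1) none))).filterMap
      (fun p => if ((w : Nat) : Int) < p.1 ∧ PySem.Int.mod p.2.1 10 = 5 ∧ p.2.2 < p.2.1 then some p.2.1 else none)
      with hcands
    have hcandsL : cands = List.filterMap (qual mass) L := by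
      rw [hcands, hLdef]; exact cands_eq mass hlen w
    have hBcands := foldl_stepB_eq_mUpd mass L none
    cases hfold : cands.foldl mUpd none with
    | none =>
      have hcnil := ((foldl_mUpd_spec cands none).1 hfold).1
      rw [hcnil]
      have hmx : PySem.List.max? ([] : List Int) (fun x => x) = none :=
        (PySem.List.max?_eq_none_iff _ _).mpr rfl
      rw [hmx]
      rfl
    | some m =>
      rcases (foldl_mUpd_spec cands none).2 m hfold with ⟨hm, hle, _⟩
      have hm_mem : m ∈ cands := by
        rcases hm with h | h
        · exact h
        · cases h
      have hc_ne : cands ≠ [] := by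
        intro h; rw [h] at hm_mem; cases hm_mem
      cases hmx : PySem.List.max? cands (fun x => x) with
      | none => exact absurd ((PySem.List.max?_eq_none_iff cands (fun x => x)).mp hmx) hc_ne
      | some mx =>
        have hmx_mem : mx ∈ cands := PySem.List.max?_mem hmx
        have hmmx : m = mx :=
          le_antisymm (PySem.List.max?_isMax hmx m hm_mem) (hle mx hmx_mem)
        -- m ∈ mass (from the invariant through A's fold)
        have hm_mass : m ∈ mass := by
          rcases hinv.2 with h | ⟨x, hx, hxm⟩
          · rw [hBcands, ← hcandsL, hfold] at h; cases h
          · rw [hBcands, ← hcandsL, hfold] at hx; cases hx; exact hxm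
        have hm_sort : m ∈ ms := (PySem.List.mem_sorted mass (fun x => x) true m).mpr hm_mass
        have hpair : ms.Pairwise (fun a b => b ≤ a) := by
          rw [hms]; simpa using PySem.List.sorted_pairwise_rev mass (fun x => x)
        have hidx := idxOf_desc_eq_countP ms m hpair hm_sort
        rw [PySem.List.index?_eq_idxOf?] at hidx
        have hcount : ms.countP (fun y => decide (m < y)) = mass.countP (fun y => decide (m < y)) := by
          rw [hms]; exact (PySem.List.sorted_perm mass (fun x => x) true).countP_eq _
        simp [rOf, hidx, hcount, ← hmmx]
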